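-- pv_equiv track=rewrite | github.com/tn3w/is-crawler | snippets/crawler_version.py | crawler_version
-- ===== SOURCE A (Python) =====
-- def crawler_version(user_agent: str) -> str | None:
--     if user_agent.startswith("Mozilla/"):
--         compat = user_agent.find("(compatible;")
--         if compat == -1:
--             return None
--         slash = user_agent.find("/", compat)
--         if slash == -1:
--             return None
--         end = slash + 1
--         while end < len(user_agent) and user_agent[end] not in " ;)":
--             end += 1
--         return user_agent[slash + 1 : end] or None
--
--     head = user_agent.split(None, 1)[0] if user_agent else ""
--     _, _, version = head.partition("/")
--     return version or None
-- ===== SOURCE B (Python) =====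
-- def crawler_version(user_agent):
--     if user_agent.startswith("Mozilla/"):
--         # single left-to-right pass: a small automaton whose state counts matched
--         # chars of "(compatible;" (0..11), then 12 = marker seen / seeking '/',
--         # then 13 = collecting the version token
--         state = 0
--         token = []
--         for ch in user_agent:
--             if state < 12:
--                 if ch == "(compatible;"[state]:
--                     state += 1
--                 elif ch == "(":
--                     state = 1
--                 else:
--                     state = 0
--             elif state == 12:
--                 if ch == "/":
--                     state = 13
--             elif ch in " ;)":
--                 break
--             else:
--                 token.append(ch)
--         if state < 13:
--             return None
--         return "".join(token) or None
--     head = user_agent.split(None, 1)[0] if user_agent else ""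
--     return head.partition("/")[2] or None
-- ===== Notes on version B (the rewrite author's own statement) =====
-- stated objective: alternative
-- what changed: The Mozilla branch is replaced by a single left-to-right character pass: a small automaton whose state counts the matched prefix of '(compatible;' (correct without backtracking because the marker's 12 characters are pairwise distinct), then waits for the first '/', then accumulates token characters until a delimiter; A's staged find/find-from-offset calls and slicing disappear.
import Mathlib
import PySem

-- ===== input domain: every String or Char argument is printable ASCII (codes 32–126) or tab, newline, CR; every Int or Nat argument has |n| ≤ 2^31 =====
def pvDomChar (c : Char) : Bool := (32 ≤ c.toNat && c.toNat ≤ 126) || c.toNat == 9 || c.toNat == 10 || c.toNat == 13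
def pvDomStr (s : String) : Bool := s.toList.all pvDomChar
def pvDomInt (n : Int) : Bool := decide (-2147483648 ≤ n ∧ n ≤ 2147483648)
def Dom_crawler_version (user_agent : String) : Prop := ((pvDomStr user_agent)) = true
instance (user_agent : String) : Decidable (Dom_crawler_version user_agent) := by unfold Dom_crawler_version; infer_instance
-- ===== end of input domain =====

-- B replaces A's staged find/find-from-offset/scan-loop extraction by ONE left-to-right
-- character pass driven by a small automaton; objective: alternative, no speed claim.

-- ===== PORT A =====
-- hand port of Python's str.partition(sep) for nonempty sep (exact: cut at the first occurrence)
def pvPartition (s : List Char) (sep : List Char) : List Char × List Char × List Char :=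
  let i := PySem.Chars.find s sep
  if i = -1 then (s, [], [])
  else (s.take i.toNat, sep, s.drop (i.toNat + sep.length))

-- A's 'while end < len(user_agent) and user_agent[end] not in " ;)": end += 1'
def pvWhileEnd (s : List Char) (e : Nat) : Nat :=
  if h : e < s.length then
    if (" ;)".toList).contains s[e] then e
    else pvWhileEnd s (e + 1)
  else e
termination_by s.length - e

def crawler_version (user_agent : String) : Option String :=
  let s := user_agent.toList
  if PySem.Chars.startswith s ("Mozilla/".toList) then
    let compat := PySem.Chars.find s ("(compatible;".toList)
    if compat = -1 then none
    else
      let slash := PySem.Chars.findFrom s ("/".toList) compat none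
      if slash = -1 then none
      else
        let e := pvWhileEnd s (slash.toNat + 1)
        let tok := PySem.Chars.slice s (some (slash + 1)) (some (e : Int))
        if tok.isEmpty then none else some (String.ofList tok)
  else
    -- 'user_agent.split(None, 1)[0] if user_agent else ""'; the [0] raises IndexError on
    -- nonempty all-whitespace input — excluded by Pre_ — so headD's default is never reached there
    let head := if !s.isEmpty then (PySem.Chars.split₀Max s 1).headD [] else []
    let version := (pvPartition head ("/".toList)).2.2
    if version.isEmpty then none else some (String.ofList version)

-- ===== PORT B =====
-- B's 'for ch in user_agent' automaton loop: state 0..11 = matched chars of "(compatible;",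
-- 12 = marker seen / seeking '/', 13 = collecting the token ('break' = early return)
def pvBLoop (s : List Char) (st : Nat) (tok : List Char) : Nat × List Char :=
  match s with
  | [] => (st, tok)
  | ch :: rest =>
    if st < 12 then
      if ch = ("(compatible;".toList).getD st ' ' then pvBLoop rest (st + 1) tok
      else if ch = '(' then pvBLoop rest 1 tok
      else pvBLoop rest 0 tok
    else if st = 12 then
      if ch = '/' then pvBLoop rest 13 tok else pvBLoop rest 12 tok
    else if (" ;)".toList).contains ch then (st, tok)
    else pvBLoop rest st (tok ++ [ch])

def crawler_version_alt (user_agent : String) : Option String :=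
  let s := user_agent.toList
  if PySem.Chars.startswith s ("Mozilla/".toList) then
    let r := pvBLoop s 0 []
    if r.1 < 13 then none
    else if r.2.isEmpty then none else some (String.ofList r.2)
  else
    let head := if !s.isEmpty then (PySem.Chars.split₀Max s 1).headD [] else []
    let version := (pvPartition head ("/".toList)).2.2
    if version.isEmpty then none else some (String.ofList version)

-- ===== PRECONDITION & SPEC =====
-- Pre_ excludes only nonempty all-whitespace strings, on which BOTH Pythons raise IndexError
-- (user_agent.split(None, 1) is empty there, so [0] fails).
def Pre_crawler_version (user_agent : String) : Prop :=
  PySem.Str.strIsspace user_agent = false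
instance (user_agent : String) : Decidable (Pre_crawler_version user_agent) := by
  unfold Pre_crawler_version; infer_instance

def pvWitness_crawler_version : String := "Mozilla/5.0 (compatible; Bot/2.1; +http://x)"

def Spec_crawler_version (user_agent : String) (out : Option String) : Prop := out = crawler_version_alt user_agent
instance (user_agent : String) (out : Option String) : Decidable (Spec_crawler_version user_agent out) := by unfold Spec_crawler_version; infer_instance

-- ===== CLAIM (what is proved, stated in full; the proofs are below) =====
def Claim_equal_crawler_version : Prop := ∀ (user_agent : String), Dom_crawler_version user_agent → Pre_crawler_version user_agent → Spec_crawler_version user_agent (crawler_version user_agent)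

-- ===== LEMMAS AND PROOFS =====

-- the observable outcome of B's loop result (what the code after the loop computes)
def pvRes (p : Nat × List Char) : Option String :=
  if p.1 < 13 then none
  else if p.2.isEmpty then none else some (String.ofList p.2)

-- find of a single character when absent
theorem pv_find_singleton_of_not_mem {c : Char} {s : List Char} (h : c ∉ s) :
    PySem.Chars.find s [c] = -1 := by
  rw [PySem.Chars.find_eq_neg_one_iff, List.singleton_infix_iff]; exact h

-- find of a single character at its first occurrence
theorem pv_find_singleton_of_first {c : Char} {pre suf : List Char} (h : c ∉ pre) :
    PySem.Chars.find (pre ++ c :: suf) [c] = (pre.length : Int) := by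
  have hmem : c ∈ pre ++ c :: suf := by simp
  have hnn : 0 ≤ PySem.Chars.find (pre ++ c :: suf) [c] :=
    (PySem.Chars.find_nonneg_iff _ _).mpr ((List.singleton_infix_iff _ _).mpr hmem)
  obtain ⟨hp, hmin⟩ := PySem.Chars.find_spec hnn
  have hmle : (PySem.Chars.find (pre ++ c :: suf) [c]).toNat ≤ pre.length := by
    by_contra hlt
    exact hmin pre.length (by omega) ⟨suf, by rw [List.drop_left]; rfl⟩
  have hget : (pre ++ c :: suf)[(PySem.Chars.find (pre ++ c :: suf) [c]).toNat]? = some c := by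
    obtain ⟨t, ht⟩ := hp
    have h0 : (List.drop (PySem.Chars.find (pre ++ c :: suf) [c]).toNat (pre ++ c :: suf))[0]? = some c := by
      rw [← ht]; rfl
    simpa [List.getElem?_drop] using h0
  have hnlt : ¬ (PySem.Chars.find (pre ++ c :: suf) [c]).toNat < pre.length := by
    intro hlt
    rw [List.getElem?_append_left hlt] at hget
    exact h (List.mem_of_getElem? hget)
  have hme : (PySem.Chars.find (pre ++ c :: suf) [c]).toNat = pre.length := by omega
  rw [← Int.toNat_of_nonneg hnn, hme]

-- find of a single character across an occurrence-free prefix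
theorem pv_find_singleton_append {c : Char} {p t : List Char} (h : c ∉ p) :
    PySem.Chars.find (p ++ t) [c] =
      if PySem.Chars.find t [c] = -1 then -1
      else (p.length : Int) + PySem.Chars.find t [c] := by
  by_cases hc : c ∈ t
  · obtain ⟨k, hk⟩ := Option.isSome_iff_exists.mp ((PySem.List.index?_isSome_iff t c).mpr hc)
    obtain ⟨pre, suf, ht, hkl, hpre⟩ := (PySem.List.index?_eq_some_iff t c k).mp hk
    subst ht
    have h1 : PySem.Chars.find (pre ++ c :: suf) [c] = (pre.length : Int) :=
      pv_find_singleton_of_first hpre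
    have h2 : PySem.Chars.find ((p ++ pre) ++ c :: suf) [c] = ((p ++ pre).length : Int) :=
      pv_find_singleton_of_first (by simp [h, hpre])
    rw [List.append_assoc] at h2
    rw [h2, h1, if_neg (by omega)]
    simp
  · have h1 := pv_find_singleton_of_not_mem hc
    have h2 := pv_find_singleton_of_not_mem (s := p ++ t) (c := c) (by simp [h, hc])
    rw [h1, h2, if_pos rfl]

-- a found pattern decomposes the string
theorem pv_find_decomp {pat s : List Char} (h : PySem.Chars.find s pat ≠ -1) :
    s.drop (PySem.Chars.find s pat).toNat =
      pat ++ s.drop ((PySem.Chars.find s pat).toNat + pat.length) := by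
  have hnn : 0 ≤ PySem.Chars.find s pat := by
    have := PySem.Chars.neg_one_le_find s pat; omega
  obtain ⟨⟨t, ht⟩, -⟩ := PySem.Chars.find_spec hnn
  rw [← ht]
  congr 1
  have h2 : List.drop ((PySem.Chars.find s pat).toNat + pat.length) s =
      List.drop pat.length (List.drop (PySem.Chars.find s pat).toNat s) := by
    rw [List.drop_drop]
  rw [h2, ← ht, List.drop_left]

-- find of a pattern that is a prefix: first occurrence is 0
theorem pv_find_of_prefix {pat s : List Char} (h : pat <+: s) :
    PySem.Chars.find s pat = 0 := by
  have hnn : 0 ≤ PySem.Chars.find s pat :=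
    (PySem.Chars.find_nonneg_iff _ _).mpr h.isInfix
  obtain ⟨-, hmin⟩ := PySem.Chars.find_spec hnn
  by_contra hne
  have hpos : 0 < (PySem.Chars.find s pat).toNat := by omega
  exact hmin 0 hpos (by simpa using h)

-- find over a cons that does not start the pattern
theorem pv_find_cons {pat : List Char} {c : Char} {rest : List Char}
    (h : ¬ pat <+: (c :: rest)) :
    PySem.Chars.find (c :: rest) pat =
      if PySem.Chars.find rest pat = -1 then -1
      else 1 + PySem.Chars.find rest pat := by
  by_cases hr : pat <:+: rest
  · have hm : 0 ≤ PySem.Chars.find rest pat := (PySem.Chars.find_nonneg_iff _ _).mpr hr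
    obtain ⟨hp, hmin⟩ := PySem.Chars.find_spec hm
    have hF : 0 ≤ PySem.Chars.find (c :: rest) pat :=
      (PySem.Chars.find_nonneg_iff _ _).mpr (hr.trans (List.suffix_cons c rest).isInfix)
    obtain ⟨hFp, hFmin⟩ := PySem.Chars.find_spec hF
    set m := (PySem.Chars.find rest pat).toNat with hmdef
    set F := (PySem.Chars.find (c :: rest) pat).toNat with hFdef
    have hF0 : F ≠ 0 := by
      intro h0
      rw [h0] at hFp
      exact h (by simpa using hFp)
    have hFle : F ≤ m + 1 := by
      by_contra hgt
      exact hFmin (m + 1) (by omega) (by simpa using hp)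
    have hFge : m + 1 ≤ F := by
      by_contra hlt
      have hdropF : List.drop F (c :: rest) = List.drop (F - 1) rest := by
        obtain ⟨F', hF'⟩ : ∃ F', F = F' + 1 := ⟨F - 1, by omega⟩
        rw [hF']
        simp
      rw [hdropF] at hFp
      exact hmin (F - 1) (by omega) hFp
    have hFm : F = m + 1 := by omega
    rw [if_neg (by omega), ← Int.toNat_of_nonneg hF, ← hFdef, hFm, ← Int.toNat_of_nonneg hm,
      ← hmdef]
    push_cast; ring
  · have h1 : PySem.Chars.find rest pat = -1 := (PySem.Chars.find_eq_neg_one_iff _ _).mpr hr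
    have h2 : PySem.Chars.find (c :: rest) pat = -1 := by
      rw [PySem.Chars.find_eq_neg_one_iff, List.infix_cons_iff]
      tauto
    rw [h1, h2, if_pos rfl]

-- '(' does not recur inside the marker
theorem pv_mark_ne_lparen (st : Nat) (h1 : 1 ≤ st) (h2 : st ≤ 11) :
    ("(compatible;".toList).getD st ' ' ≠ '(' := by
  interval_cases st <;> decide

-- the marker decomposed one character at a time
theorem pv_mark_drop (st : Nat) (h : st ≤ 11) :
    ("(compatible;".toList).drop st =
      ("(compatible;".toList).getD st ' ' :: ("(compatible;".toList).drop (st + 1) := by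
  have hlen : st < ("(compatible;".toList).length := by
    have : ("(compatible;".toList).length = 12 := by decide
    omega
  rw [List.getD_eq_getElem _ _ hlen, List.drop_eq_getElem_cons hlen]

-- SHIFT: a failed partial match of length ≥ 1 behaves (observably) like state 0
theorem pv_shift (s : List Char) (st : Nat) (tok : List Char)
    (h1 : 1 ≤ st) (h2 : st ≤ 11)
    (hnp : ¬ ("(compatible;".toList).drop st <+: s) :
    pvRes (pvBLoop s st tok) = pvRes (pvBLoop s 0 tok) := by
  induction s generalizing st with
  | nil =>
    simp only [pvBLoop, pvRes]
    rw [if_pos (by omega : st < 13), if_pos (by decide : (0:Nat) < 13)]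
  | cons c rest ih =>
    rw [pvBLoop, pvBLoop]
    rw [if_pos (by omega : st < 12), if_pos (by decide : (0:Nat) < 12)]
    by_cases hm : c = ("(compatible;".toList).getD st ' '
    · rw [if_pos hm]
      have hc0 : ¬ c = ("(compatible;".toList).getD 0 ' ' := by
        rw [hm]
        intro h
        exact pv_mark_ne_lparen st h1 h2 (by rw [h]; decide)
      have hcp : ¬ c = '(' := by rw [hm]; exact pv_mark_ne_lparen st h1 h2
      rw [if_neg hc0, if_neg hcp]
      have hlt : st + 1 ≤ 11 := by
        by_contra hge
        have hst11 : st = 11 := by omega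
        apply hnp
        subst hst11
        rw [pv_mark_drop 11 (by omega)]
        have hd : ("(compatible;".toList).drop 12 = [] := by decide
        rw [hd, ← hm]
        exact ⟨rest, rfl⟩
      have hnp' : ¬ ("(compatible;".toList).drop (st + 1) <+: rest := by
        intro hp
        apply hnp
        rw [pv_mark_drop st h2, ← hm]
        exact (List.cons_prefix_cons).mpr ⟨rfl, hp⟩
      exact ih (st + 1) (by omega) hlt hnp'
    · rw [if_neg hm]
      by_cases hcp : c = '('
      · have hc0 : c = ("(compatible;".toList).getD 0 ' ' := by rw [hcp]; decide
        rw [if_pos hcp, if_pos hc0]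
      · have hc0 : ¬ c = ("(compatible;".toList).getD 0 ' ' := by
          intro h; exact hcp (by rw [h]; decide)
        rw [if_neg hcp, if_neg hc0]

-- CONSUME: when the rest of the marker starts the string, the loop eats it
theorem pv_consume (s : List Char) (st : Nat) (tok : List Char)
    (h2 : st ≤ 12) (hp : ("(compatible;".toList).drop st <+: s) :
    pvBLoop s st tok = pvBLoop (s.drop (12 - st)) 12 tok := by
  induction s generalizing st with
  | nil =>
    have hst : st = 12 := by
      by_contra hne
      have hlen := hp.length_le
      have hl12 : ("(compatible;".toList).length = 12 := by decide
      simp [List.length_drop] at hlen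
      omega
    subst hst; simp
  | cons c rest ih =>
    by_cases hst : st = 12
    · subst hst; simp
    · have hlt : st < 12 := by omega
      rw [pv_mark_drop st (by omega)] at hp
      obtain ⟨hc, hp'⟩ := (List.cons_prefix_cons).mp hp
      rw [pvBLoop, if_pos hlt, if_pos hc.symm]
      rw [ih (st + 1) (by omega) hp']
      congr 1
      have h1 : 12 - st = (12 - (st + 1)) + 1 := by omega
      rw [h1, List.drop_succ_cons]

-- CORE: the matching phase finds exactly the first occurrence of the marker
theorem pv_core (s : List Char) (tok : List Char) :
    pvRes (pvBLoop s 0 tok) =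
      if PySem.Chars.find s ("(compatible;".toList) = -1 then none
      else pvRes (pvBLoop (s.drop ((PySem.Chars.find s ("(compatible;".toList)).toNat + 12)) 12 tok) := by
  induction s with
  | nil =>
    have h : PySem.Chars.find ([] : List Char) ("(compatible;".toList) = -1 := by decide
    rw [h, if_pos rfl]
    simp [pvBLoop, pvRes]
  | cons c rest ih =>
    by_cases hpre : ("(compatible;".toList) <+: (c :: rest)
    · have hf : PySem.Chars.find (c :: rest) ("(compatible;".toList) = 0 := pv_find_of_prefix hpre
      rw [hf, if_neg (by omega)]
      rw [pv_consume (c :: rest) 0 tok (by omega) (by simpa using hpre)]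
      norm_num
    · have hf := pv_find_cons hpre
      have hstep : pvBLoop (c :: rest) 0 tok =
          pvBLoop rest (if c = '(' then 1 else 0) tok := by
        rw [pvBLoop, if_pos (by decide : (0:Nat) < 12)]
        by_cases hc : c = '('
        · rw [if_pos (show c = ("(compatible;".toList).getD 0 ' ' by rw [hc]; decide), if_pos hc]
        · rw [if_neg (fun h => hc (by rw [h]; decide)), if_neg hc, if_neg hc]
      have hL : pvRes (pvBLoop (c :: rest) 0 tok) = pvRes (pvBLoop rest 0 tok) := by
        rw [hstep]
        by_cases hc : c = '('
        · rw [if_pos hc]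
          have hnp : ¬ ("(compatible;".toList).drop 1 <+: rest := by
            intro hp
            apply hpre
            have h0 : ("(compatible;".toList) = '(' :: ("(compatible;".toList).drop 1 := by decide
            rw [h0, hc]
            exact (List.cons_prefix_cons).mpr ⟨rfl, hp⟩
          exact pv_shift rest 1 tok (by omega) (by omega) hnp
        · rw [if_neg hc]
      rw [hL, ih]
      by_cases hr : PySem.Chars.find rest ("(compatible;".toList) = -1
      · have hf2 : PySem.Chars.find (c :: rest) ("(compatible;".toList) = -1 := by
          rw [hf, if_pos hr]
        rw [if_pos hr, hf2, if_pos rfl]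
      · have hnn : 0 ≤ PySem.Chars.find rest ("(compatible;".toList) := by
          have := PySem.Chars.neg_one_le_find rest ("(compatible;".toList); omega
        have hf2 : PySem.Chars.find (c :: rest) ("(compatible;".toList) =
            1 + PySem.Chars.find rest ("(compatible;".toList) := by
          rw [hf, if_neg hr]
        rw [if_neg hr, hf2,
          if_neg (by omega : ¬ (1 + PySem.Chars.find rest ("(compatible;".toList) = -1))]
        have ht : (1 + PySem.Chars.find rest ("(compatible;".toList)).toNat + 12 =
            ((PySem.Chars.find rest ("(compatible;".toList)).toNat + 12) + 1 := by omega
        rw [ht, List.drop_succ_cons]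

-- SEEK: from state 12 the loop finds the first '/'
theorem pv_seek (t : List Char) (tok : List Char) :
    pvBLoop t 12 tok =
      if PySem.Chars.find t ['/'] = -1 then (12, tok)
      else pvBLoop (t.drop ((PySem.Chars.find t ['/']).toNat + 1)) 13 tok := by
  induction t with
  | nil =>
    have h : PySem.Chars.find ([] : List Char) ['/'] = -1 := by decide
    rw [h, if_pos rfl, pvBLoop]
  | cons c rest ih =>
    rw [pvBLoop, if_neg (by decide : ¬ (12:Nat) < 12), if_pos rfl]
    by_cases hc : c = '/'
    · have hf : PySem.Chars.find (c :: rest) ['/'] = 0 :=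
        pv_find_of_prefix (by rw [hc]; exact ⟨rest, rfl⟩)
      rw [if_pos hc, hf, if_neg (by omega)]
      rfl
    · have hf := pv_find_cons (pat := ['/']) (c := c) (rest := rest)
        (by intro hp; exact hc ((List.cons_prefix_cons).mp hp).1.symm)
      rw [if_neg hc, ih]
      by_cases hr : PySem.Chars.find rest ['/'] = -1
      · have hf2 : PySem.Chars.find (c :: rest) ['/'] = -1 := by rw [hf, if_pos hr]
        rw [if_pos hr, hf2, if_pos rfl]
      · have hnn : 0 ≤ PySem.Chars.find rest ['/'] := by
          have := PySem.Chars.neg_one_le_find rest ['/']; omega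
        have hf2 : PySem.Chars.find (c :: rest) ['/'] = 1 + PySem.Chars.find rest ['/'] := by
          rw [hf, if_neg hr]
        rw [if_neg hr, hf2, if_neg (by omega : ¬ (1 + PySem.Chars.find rest ['/'] = -1))]
        have ht : (1 + PySem.Chars.find rest ['/']).toNat + 1 =
            ((PySem.Chars.find rest ['/']).toNat + 1) + 1 := by omega
        rw [ht, List.drop_succ_cons]

-- COLLECT: from state 13 the loop appends characters up to the first delimiter
theorem pv_collect (t : List Char) (tok : List Char) :
    pvBLoop t 13 tok =
      (13, tok ++ t.takeWhile (fun c => !((" ;)".toList).contains c))) := by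
  induction t generalizing tok with
  | nil => simp [pvBLoop]
  | cons c rest ih =>
    rw [pvBLoop, if_neg (by decide : ¬ (13:Nat) < 12), if_neg (by decide : ¬ (13:Nat) = 12)]
    by_cases hc : (" ;)".toList).contains c = true
    · rw [if_pos hc, List.takeWhile_cons]
      simp only [hc, Bool.not_true]
      simp
    · have hcf : (" ;)".toList).contains c = false := by simpa using hc
      rw [if_neg hc, ih, List.takeWhile_cons]
      simp only [hcf, Bool.not_false]
      simp

-- A's scanning loop computes the takeWhile of the suffix
theorem pv_whileEnd_spec (s : List Char) (e : Nat) (he : e ≤ s.length) :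
    e ≤ pvWhileEnd s e ∧
    (s.drop e).take (pvWhileEnd s e - e) =
      (s.drop e).takeWhile (fun c => !((" ;)".toList).contains c)) := by
  rw [pvWhileEnd]
  by_cases h : e < s.length
  · rw [dif_pos h, List.drop_eq_getElem_cons h]
    by_cases hb : (" ;)".toList).contains s[e] = true
    · rw [if_pos hb]
      have hpfalse : ¬ ((fun c => !((" ;)".toList).contains c)) s[e] = true) := by
        simp only []
        rw [hb]
        decide
      refine ⟨le_refl e, ?_⟩
      rw [Nat.sub_self, List.take_zero,
        List.takeWhile_cons_of_neg (p := fun c => !((" ;)".toList).contains c)) hpfalse]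
    · have hbf : (" ;)".toList).contains s[e] = false := by
        cases hx : (" ;)".toList).contains s[e]
        · rfl
        · exact absurd hx hb
      have hptrue : ((fun c => !((" ;)".toList).contains c)) s[e]) = true := by
        simp only []
        rw [hbf]
        exact Bool.not_false
      rw [if_neg hb]
      obtain ⟨ih1, ih2⟩ := pv_whileEnd_spec s (e + 1) h
      refine ⟨by omega, ?_⟩
      have hstep : pvWhileEnd s (e + 1) - e = (pvWhileEnd s (e + 1) - (e + 1)) + 1 := by omega
      rw [hstep, List.take_succ_cons,
        List.takeWhile_cons_of_pos (p := fun c => !((" ;)".toList).contains c)) hptrue, ih2]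
  · rw [dif_neg h]
    have hnil : s.drop e = [] := List.drop_eq_nil_of_le (by omega)
    rw [hnil, Nat.sub_self]
    exact ⟨le_refl e, rfl⟩
termination_by s.length - e

-- ===== VERDICT (by name: the statement is the Claim_ definition above) =====
theorem crawler_version_spec : Claim_equal_crawler_version := by
  intro ua _ _
  show crawler_version ua = crawler_version_alt ua
  simp only [crawler_version, crawler_version_alt]
  by_cases hs : PySem.Chars.startswith ua.toList ("Mozilla/".toList) = true
  case neg => rw [if_neg hs, if_neg hs]
  rw [if_pos hs, if_pos hs]
  have hB : (let r := pvBLoop ua.toList 0 [];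
      if r.1 < 13 then none
      else if r.2.isEmpty then none else some (String.ofList r.2)) =
      pvRes (pvBLoop ua.toList 0 []) := rfl
  rw [hB, pv_core]
  by_cases h1 : PySem.Chars.find ua.toList ("(compatible;".toList) = -1
  · rw [if_pos h1, if_pos h1]
  · have hnn : 0 ≤ PySem.Chars.find ua.toList ("(compatible;".toList) := by
      have := PySem.Chars.neg_one_le_find ua.toList ("(compatible;".toList); omega
    set k := (PySem.Chars.find ua.toList ("(compatible;".toList)).toNat with hkdef
    have hkc : PySem.Chars.find ua.toList ("(compatible;".toList) = (k : Int) := by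
      rw [hkdef, Int.toNat_of_nonneg hnn]
    have hklen : k ≤ ua.toList.length := by
      have := PySem.Chars.find_le_length ua.toList ("(compatible;".toList); omega
    have hpatlen : ("(compatible;".toList).length = 12 := by decide
    have hdecomp : ua.toList.drop k = ("(compatible;".toList) ++ ua.toList.drop (k + 12) := by
      have hd := pv_find_decomp (pat := ("(compatible;".toList)) (s := ua.toList) h1
      rw [hpatlen, ← hkdef] at hd
      exact hd
    have hlen := congrArg List.length hdecomp
    simp only [List.length_drop, List.length_append, hpatlen] at hlen
    have hk12 : k + 12 ≤ ua.toList.length := by omega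
    have hslash : ("/".toList) = ['/'] := rfl
    have hff : PySem.Chars.findFrom ua.toList ("/".toList)
        (PySem.Chars.find ua.toList ("(compatible;".toList)) none =
        if PySem.Chars.find (ua.toList.drop k) ("/".toList) = -1 then -1
        else (k : Int) + PySem.Chars.find (ua.toList.drop k) ("/".toList) := by
      rw [hkc]
      exact PySem.Chars.findFrom_natCast ua.toList ("/".toList) k hklen
    have hdropfind : PySem.Chars.find (ua.toList.drop k) ("/".toList) =
        if PySem.Chars.find (ua.toList.drop (k + 12)) ['/'] = -1 then -1
        else (12 : Int) + PySem.Chars.find (ua.toList.drop (k + 12)) ['/'] := by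
      rw [hslash, hdecomp]
      rw [pv_find_singleton_append (c := '/')
        (p := "(compatible;".toList) (t := ua.toList.drop (k + 12)) (by decide)]
      rw [hpatlen]
      norm_num
    rw [if_neg h1, if_neg h1, pv_seek]
    by_cases h2 : PySem.Chars.find (ua.toList.drop (k + 12)) ['/'] = -1
    · have hFFn : PySem.Chars.findFrom ua.toList ("/".toList)
          (PySem.Chars.find ua.toList ("(compatible;".toList)) none = -1 := by
        rw [hff, hdropfind, if_pos h2, if_pos rfl]
      rw [hFFn, if_pos rfl, if_pos h2]
      rfl
    · have hjnn : 0 ≤ PySem.Chars.find (ua.toList.drop (k + 12)) ['/'] := by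
        have := PySem.Chars.neg_one_le_find (ua.toList.drop (k + 12)) ['/']; omega
      set m := (PySem.Chars.find (ua.toList.drop (k + 12)) ['/']).toNat with hmdef
      have hjc : PySem.Chars.find (ua.toList.drop (k + 12)) ['/'] = (m : Int) := by
        rw [hmdef, Int.toNat_of_nonneg hjnn]
      obtain ⟨⟨t, ht⟩, -⟩ := PySem.Chars.find_spec hjnn
      rw [← hmdef] at ht
      have hdl : (ua.toList.drop (k + 12)).length = ua.toList.length - (k + 12) := by
        simp
      have hmlt : m < (ua.toList.drop (k + 12)).length := by
        by_contra hge
        have hnil2 : List.drop m (List.drop (k + 12) ua.toList) = [] :=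
          List.drop_eq_nil_of_le (by omega)
        rw [hnil2] at ht
        exact absurd ht (by simp)
      have ha : k + 12 + m + 1 ≤ ua.toList.length := by omega
      have hFF : PySem.Chars.findFrom ua.toList ("/".toList)
          (PySem.Chars.find ua.toList ("(compatible;".toList)) none = ((k + 12 + m : Nat) : Int) := by
        rw [hff, hdropfind, if_neg h2, hjc]
        rw [if_neg (show ¬((12 : Int) + (m : Int) = -1) from by omega)]
        push_cast
        ring
      rw [hFF]
      rw [if_neg (show ¬(((k + 12 + m : Nat) : Int) = -1) from by omega)]
      rw [Int.toNat_natCast]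
      rw [show ((k + 12 + m : Nat) : Int) + 1 = ((k + 12 + m + 1 : Nat) : Int) from by push_cast; ring]
      obtain ⟨hege, heq⟩ := pv_whileEnd_spec ua.toList (k + 12 + m + 1) ha
      have htokA : PySem.Chars.slice ua.toList
          (some ((k + 12 + m + 1 : Nat) : Int))
          (some ((pvWhileEnd ua.toList (k + 12 + m + 1) : Nat) : Int)) =
          (ua.toList.drop (k + 12 + m + 1)).takeWhile (fun c => !((" ;)".toList).contains c)) := by
        rw [PySem.Chars.slice_eq_listSlice, PySem.List.slice_natCast]
        exact heq
      rw [htokA]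
      have hdd : (ua.toList.drop (k + 12)).drop (m + 1) = ua.toList.drop (k + 12 + m + 1) := by
        rw [List.drop_drop]
        congr 1
      rw [hdd, pv_collect, if_neg h2]
      simp only [pvRes, List.nil_append]
      rw [if_neg (by decide : ¬ (13:Nat) < 13)]
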